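-- pv_equiv track=rewrite | github.com/johnjin0000/pk_showdown_gen_algo | teams_helper.py | fill_teams
-- ===== SOURCE A (Python) =====
-- def fill_teams(child, parent):
--     for i in range(6 - len(child)):
--         j = 0
--         pokemon = parent[j][0]
--         cur_child_team = [child[k][0] for k in range(len(child))]
--         while ((pokemon in cur_child_team) or
--                (pokemon == "Zapdos" and "Zapdos-Galar" in cur_child_team) or
--                (pokemon == "Zapdos-Galar" and "Zapdos" in cur_child_team) or
--                (pokemon == "Slowking" and "Slowking-Galar" in cur_child_team) or
--                (pokemon == "Slowking-Galar" and "Slowking" in cur_child_team)):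
--             j += 1
--             pokemon = parent[j][0]
--         child.append(parent[j])
--     return child
-- ===== SOURCE B (Python) =====
-- CONFLICTS = {"Zapdos": "Zapdos-Galar", "Zapdos-Galar": "Zapdos",
--              "Slowking": "Slowking-Galar", "Slowking-Galar": "Slowking"}
--
--
-- def fill_teams(child, parent):
--     if len(child) >= 6:
--         return child
--     blocked = set()
--     for row in child:
--         name = row[0]
--         blocked.add(name)
--         blocked.add(CONFLICTS.get(name, name))
--     j = 0
--     while len(child) < 6:
--         row = parent[j]
--         j += 1
--         name = row[0]
--         if name not in blocked:
--             child.append(row)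
--             blocked.add(name)
--             blocked.add(CONFLICTS.get(name, name))
--     return child
-- ===== Notes on version B (the rewrite author's own statement) =====
-- stated objective: simpler
-- what changed: A restarts its parent scan from index 0 and rebuilds the list of child first-names for every slot it fills; B seeds a blocked-name set (names plus their Zapdos/Slowking Galar counterparts) once from child and makes a single forward pass over parent with a persistent pointer, updating the set as it picks.
import Mathlib
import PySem

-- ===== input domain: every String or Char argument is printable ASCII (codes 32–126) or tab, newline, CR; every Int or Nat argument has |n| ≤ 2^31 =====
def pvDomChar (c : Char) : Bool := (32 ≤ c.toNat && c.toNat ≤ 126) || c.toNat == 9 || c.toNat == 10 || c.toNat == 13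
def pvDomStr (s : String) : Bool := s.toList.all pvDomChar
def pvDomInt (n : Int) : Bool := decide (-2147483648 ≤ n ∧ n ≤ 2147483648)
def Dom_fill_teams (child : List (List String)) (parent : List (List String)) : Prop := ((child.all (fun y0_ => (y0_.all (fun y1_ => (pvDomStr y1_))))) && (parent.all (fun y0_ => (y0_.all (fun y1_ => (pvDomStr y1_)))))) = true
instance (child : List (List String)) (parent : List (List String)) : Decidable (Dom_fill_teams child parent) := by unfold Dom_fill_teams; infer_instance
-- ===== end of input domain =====

-- B replaces A's restart-from-zero rescans (and per-round rebuild of the child name list)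
-- by one blocked-name set seeded from child plus a single forward pass over parent with a
-- persistent pointer (objective: simpler); A mutates `child` in place, B does the same,
-- the theorems below are about the return value.

-- ===== PORT A =====
-- row[0] of a team row; the .getD "" is only reached outside Pre_ (empty row = IndexError)
def pvRowName (r : List String) : String := (PySem.List.pyGet? r 0).getD ""

-- the while-loop condition of A, over the current child first-names
def pvBlockedA (p : String) (names : List String) : Bool :=
  names.contains p ||
  (p == "Zapdos" && names.contains "Zapdos-Galar") ||
  (p == "Zapdos-Galar" && names.contains "Zapdos") ||
  (p == "Slowking" && names.contains "Slowking-Galar") ||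
  (p == "Slowking-Galar" && names.contains "Slowking")

-- A's inner while loop: j = 0; while blocked: j += 1; returns parent[j]
-- (none = the IndexError when j runs off the end, outside Pre_)
def pvFindA (parent : List (List String)) (names : List String) : Option (List String) :=
  match parent with
  | [] => none
  | row :: rest => if pvBlockedA (pvRowName row) names then pvFindA rest names else some row

-- A's outer for-loop over range(6 - len(child))
def pvFillA (fuel : Nat) (child : List (List String)) (parent : List (List String)) :
    List (List String) :=
  match fuel with
  | 0 => child
  | n + 1 =>
    match pvFindA parent (child.map pvRowName) with
    | none => child  -- IndexError in Python, outside Pre_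
    | some row => pvFillA n (child ++ [row]) parent

def fill_teams (child : List (List String)) (parent : List (List String)) : List (List String) :=
  pvFillA (6 - child.length) child parent

-- ===== PORT B =====
-- row[0]; the .getD "" is only reached outside Pre_ (empty row = IndexError)
def pvName (r : List String) : String := (PySem.List.pyGet? r 0).getD ""

-- CONFLICTS.get(name, name)
def pvCounterpart (name : String) : String :=
  if name == "Zapdos" then "Zapdos-Galar"
  else if name == "Zapdos-Galar" then "Zapdos"
  else if name == "Slowking" then "Slowking-Galar"
  else if name == "Slowking-Galar" then "Slowking"
  else name

-- blocked.add(name); blocked.add(CONFLICTS.get(name, name))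
def pvBlockAdd (s : PySem.Set String) (name : String) : PySem.Set String :=
  PySem.Set.add (PySem.Set.add s name) (pvCounterpart name)

-- B's while loop: persistent pointer over parent (structural), need = 6 - len(child)
def pvFillB (need : Nat) (blocked : PySem.Set String) (parent : List (List String))
    (child : List (List String)) : List (List String) :=
  match need, parent with
  | 0, _ => child
  | _ + 1, [] => child  -- IndexError in Python, outside Pre_
  | n + 1, row :: rest =>
    let name := pvName row
    if PySem.Set.contains blocked name then pvFillB (n + 1) blocked rest child
    else pvFillB n (pvBlockAdd blocked name) rest (child ++ [row])

def fill_teams_alt (child : List (List String)) (parent : List (List String)) :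
    List (List String) :=
  if 6 ≤ child.length then child
  else
    let blocked := child.foldl (fun s r => pvBlockAdd s (pvName r)) PySem.Set.empty
    pvFillB (6 - child.length) blocked parent child

-- ===== PRECONDITION & SPEC =====
-- canonical key identifying the two conflict pairs
def pvKey (n : String) : String :=
  if n == "Zapdos-Galar" then "Zapdos" else if n == "Slowking-Galar" then "Slowking" else n

-- fresh names parent offers against child: distinct conflict-keys of parent rows not already keyed in child
def pvFresh (child parent : List (List String)) : Nat :=
  ((PySem.List.dedup (parent.map (fun r => pvKey (pvRowName r)))).filter
    (fun k => !(child.map (fun r => pvKey (pvRowName r))).contains k)).length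

-- Pre_ excludes exactly A's IndexErrors: a child row read as row[0] being empty, parent not
-- offering enough fresh (conflict-distinct) names to reach 6, and an empty parent row that the
-- scan reaches before 6 is full (rows past the last pick are never read).
def Pre_fill_teams (child : List (List String)) (parent : List (List String)) : Prop :=
  6 ≤ child.length ∨
  ((∀ r ∈ child, r ≠ []) ∧ 6 - child.length ≤ pvFresh child parent ∧
   ∀ i < parent.length, parent[i]! = [] → 6 - child.length ≤ pvFresh child (parent.take i))
instance (child : List (List String)) (parent : List (List String)) :
    Decidable (Pre_fill_teams child parent) := by unfold Pre_fill_teams; infer_instance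

def pvWitness_fill_teams : List (List String) × List (List String) :=
  ([["Zapdos", "x"]], [["Zapdos-Galar"], ["Mew"], ["Pikachu"], ["Mew"], ["Eevee"], ["Ditto"], ["Snorlax"], ["Lapras"]])

def Spec_fill_teams (child : List (List String)) (parent : List (List String)) (out : List (List String)) : Prop := out = fill_teams_alt child parent
instance (child : List (List String)) (parent : List (List String)) (out : List (List String)) : Decidable (Spec_fill_teams child parent out) := by unfold Spec_fill_teams; infer_instance

-- ===== CLAIM (what is proved, stated in full; the proofs are below) =====
def Claim_equal_fill_teams : Prop := ∀ (child : List (List String)) (parent : List (List String)), Dom_fill_teams child parent → Pre_fill_teams child parent → Spec_fill_teams child parent (fill_teams child parent)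

-- ===== LEMMAS AND PROOFS =====

-- per-element reading of A's while condition
theorem pvBlockedA_cons (p x : String) (ns : List String) :
    pvBlockedA p (x :: ns) = ((x == p || pvCounterpart x == p) || pvBlockedA p ns) := by
  rw [Bool.eq_iff_iff]
  by_cases hx1 : x = "Zapdos" <;> by_cases hx2 : x = "Zapdos-Galar" <;>
    by_cases hx3 : x = "Slowking" <;> by_cases hx4 : x = "Slowking-Galar" <;>
    simp_all [pvBlockedA, pvCounterpart, beq_iff_eq, @eq_comm _ p] <;> tauto

theorem pvBlockedA_map_iff (c : List (List String)) (p : String) :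
    pvBlockedA p (c.map pvRowName) = true ↔
      ∃ r ∈ c, pvRowName r = p ∨ pvCounterpart (pvRowName r) = p := by
  induction c with
  | nil => simp [pvBlockedA]
  | cons r c ih => simp only [List.map_cons, pvBlockedA_cons, Bool.or_eq_true, beq_iff_eq,
      ih, List.mem_cons]; aesop

-- B's blocked set built from a child accumulator, as a membership statement
theorem pvMem_foldl (c : List (List String)) (s : PySem.Set String) (p : String) :
    (p ∈ c.foldl (fun s r => pvBlockAdd s (pvRowName r)) s) ↔
      p ∈ s ∨ ∃ r ∈ c, pvRowName r = p ∨ pvCounterpart (pvRowName r) = p := by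
  induction c generalizing s with
  | nil => simp
  | cons r c ih =>
    rw [List.foldl_cons, ih]
    simp only [pvBlockAdd, PySem.Set.mem_add, List.mem_cons]
    aesop

-- B's set membership test computes exactly A's while condition
theorem pvContains_blockedSet (c : List (List String)) (p : String) :
    PySem.Set.contains (c.foldl (fun s r => pvBlockAdd s (pvRowName r)) PySem.Set.empty) p =
      pvBlockedA p (c.map pvRowName) := by
  rw [Bool.eq_iff_iff, PySem.Set.contains_iff, pvMem_foldl, pvBlockedA_map_iff]
  simp [PySem.Set.empty]

-- monotonicity: extending child keeps a row blocked
theorem pvBlockedA_append (p : String) (ns ms : List String) (h : pvBlockedA p ns = true) :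
    pvBlockedA p (ns ++ ms) = true := by
  simp only [pvBlockedA, List.contains_append, Bool.or_eq_true, Bool.and_eq_true] at h ⊢
  tauto

theorem pvBlockedA_of_mem (p : String) (ns : List String) (h : p ∈ ns) :
    pvBlockedA p ns = true := by
  simp [pvBlockedA, h]

theorem pvFindA_all_blocked (pre : List (List String)) (ns : List String)
    (h : ∀ r ∈ pre, pvBlockedA (pvRowName r) ns = true) : pvFindA pre ns = none := by
  induction pre with
  | nil => rfl
  | cons r pre ih =>
    simp only [pvFindA, h r (by simp), if_true]
    exact ih (fun r' hr' => h r' (by simp [hr']))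

theorem pvFindA_append (pre rest : List (List String)) (ns : List String)
    (h : ∀ r ∈ pre, pvBlockedA (pvRowName r) ns = true) :
    pvFindA (pre ++ rest) ns = pvFindA rest ns := by
  induction pre with
  | nil => rfl
  | cons r pre ih =>
    simp only [List.cons_append, pvFindA, h r (by simp), if_true]
    exact ih (fun r' hr' => h r' (by simp [hr']))

-- unfolding equation for B's loop on a cons cell
theorem pvFillB_cons (n : Nat) (blocked : PySem.Set String) (row : List String)
    (rest child : List (List String)) :
    pvFillB (n + 1) blocked (row :: rest) child =
      (if PySem.Set.contains blocked (pvRowName row) then pvFillB (n + 1) blocked rest child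
       else pvFillB n (pvBlockAdd blocked (pvRowName row)) rest (child ++ [row])) := rfl

-- main loop correspondence: A rescanning from index 0 each round = B's persistent pointer
theorem pvFill_main (rest : List (List String)) :
    ∀ (pre acc : List (List String)) (fuel : Nat),
      (∀ r ∈ pre, pvBlockedA (pvRowName r) (acc.map pvRowName) = true) →
      pvFillA fuel acc (pre ++ rest) =
        pvFillB fuel (acc.foldl (fun s r => pvBlockAdd s (pvRowName r)) PySem.Set.empty)
          rest acc := by
  induction rest with
  | nil =>
    intro pre acc fuel h
    cases fuel with
    | zero => rfl
    | succ n =>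
      show (match pvFindA (pre ++ []) (acc.map pvRowName) with
            | none => acc
            | some row => pvFillA n (acc ++ [row]) (pre ++ [])) = acc
      rw [List.append_nil, pvFindA_all_blocked pre _ h]
  | cons row rest ih =>
    intro pre acc fuel h
    cases fuel with
    | zero => rfl
    | succ n =>
      have hsplit : pre ++ row :: rest = (pre ++ [row]) ++ rest := by simp
      by_cases hb : pvBlockedA (pvRowName row) (acc.map pvRowName) = true
      · have hc := pvContains_blockedSet acc (pvRowName row)
        rw [hb] at hc
        have h' : ∀ r ∈ pre ++ [row], pvBlockedA (pvRowName r) (acc.map pvRowName) = true := by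
          intro r hr
          rcases List.mem_append.mp hr with hr | hr
          · exact h r hr
          · simp only [List.mem_singleton] at hr; subst hr; exact hb
        rw [hsplit, ih (pre ++ [row]) acc (n + 1) h', pvFillB_cons, if_pos hc]
      · -- A finds `row`; B picks it too
        have hfind : pvFindA (pre ++ row :: rest) (acc.map pvRowName) = some row := by
          rw [pvFindA_append pre _ _ h]
          simp [pvFindA, hb]
        have hA : pvFillA (n + 1) acc (pre ++ row :: rest) =
            pvFillA n (acc ++ [row]) (pre ++ row :: rest) := by
          show (match pvFindA (pre ++ row :: rest) (acc.map pvRowName) with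
                | none => acc
                | some r => pvFillA n (acc ++ [r]) (pre ++ row :: rest)) = _
          rw [hfind]
        have h' : ∀ r ∈ pre ++ [row],
            pvBlockedA (pvRowName r) ((acc ++ [row]).map pvRowName) = true := by
          intro r hr
          rw [List.map_append]
          rcases List.mem_append.mp hr with hr | hr
          · exact pvBlockedA_append _ _ _ (h r hr)
          · simp only [List.mem_singleton] at hr; subst hr
            exact pvBlockedA_of_mem _ _ (by simp)
        have hc : PySem.Set.contains
            (acc.foldl (fun s r => pvBlockAdd s (pvRowName r)) PySem.Set.empty)
            (pvRowName row) = false := by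
          rw [pvContains_blockedSet]; simpa using hb
        rw [hA, hsplit, ih (pre ++ [row]) (acc ++ [row]) n h', pvFillB_cons, if_neg (by simp only [hc]; simp)]
        rw [List.foldl_append]
        rfl

-- ===== VERDICT (by name: the statement is the Claim_ definition above) =====
theorem fill_teams_spec : Claim_equal_fill_teams := by
  intro child parent _ _
  unfold Spec_fill_teams fill_teams fill_teams_alt
  by_cases h : 6 ≤ child.length
  · simp [h, Nat.sub_eq_zero_of_le h, pvFillA]
  · simpa [h] using pvFill_main parent [] child (6 - child.length) (by simp)
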